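-- pv_equiv track=rewrite | github.com/baeziy/daa-codes | ass01/task3/divideAndConquer.py | foo
-- ===== SOURCE A (Python) =====
-- def foo(L, p, r):
--     if (p==r):
--         if L[p] % 7 == 0:
--             return L[p]
--         else:
--             return 1
--
--     else:
--         mid = (p+r)//2
--         left = foo(L, p, mid)
--         right = foo(L, mid + 1, r)
--
--     return left * right
-- ===== SOURCE B (Python) =====
-- def foo(L, p, r):
--     # walk i from p through r (the contract guarantees a nonempty range),
--     # keeping a running product of the elements divisible by 7
--     prod = 1
--     i = p
--     while True:
--         if L[i] % 7 == 0:
--             prod *= L[i]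
--         if i == r:
--             return prod
--         i += 1
-- ===== Notes on version B (the rewrite author's own statement) =====
-- stated objective: simpler
-- what changed: Replaces the recursive binary split over index ranges with a single left-to-right loop maintaining a running product.
import Mathlib
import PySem

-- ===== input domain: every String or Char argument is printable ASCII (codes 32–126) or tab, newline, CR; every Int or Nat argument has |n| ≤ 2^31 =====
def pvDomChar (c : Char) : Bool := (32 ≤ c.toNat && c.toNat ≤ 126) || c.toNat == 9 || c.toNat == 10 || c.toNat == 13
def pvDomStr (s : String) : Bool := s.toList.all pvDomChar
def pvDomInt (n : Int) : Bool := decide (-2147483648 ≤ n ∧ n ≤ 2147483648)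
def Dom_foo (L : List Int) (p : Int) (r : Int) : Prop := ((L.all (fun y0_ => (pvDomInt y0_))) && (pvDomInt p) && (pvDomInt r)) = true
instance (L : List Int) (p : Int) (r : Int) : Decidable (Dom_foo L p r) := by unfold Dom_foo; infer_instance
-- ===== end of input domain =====

-- B is a flat left-to-right loop with a running product instead of A's recursive binary split (objective: simpler).

-- ===== PORT A =====
-- A recurses on half-open splits; fuel (r-p).toNat+1 bounds the recursion depth
-- (inside Pre_ the fuel is never exhausted; outside Pre_ the Python diverges or raises).
def fooAux : Nat → List Int → Int → Int → Int
  | 0, _, _, _ => 1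
  | fuel+1, L, p, r =>
    if p = r then
      let v := PySem.List.pyGetD L p 0
      if PySem.Int.mod v 7 = 0 then v else 1
    else
      let mid := PySem.Int.floordiv (p + r) 2
      let left := fooAux fuel L p mid
      let right := fooAux fuel L (mid + 1) r
      left * right

def foo (L : List Int) (p : Int) (r : Int) : Int :=
  fooAux ((r - p).toNat + 1) L p r

-- ===== PORT B =====
-- B's 'while True' walk from p through r; fuel (r-p).toNat+1 is the exact number of
-- iterations inside Pre_ (outside, the Python loop runs off the list and raises).
def fooAltAux : Nat → List Int → Int → Int → Int → Int
  | 0, _, _, _, prod => prod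
  | fuel+1, L, r, i, prod =>
    let prod' := if PySem.Int.mod (PySem.List.pyGetD L i 0) 7 = 0
                 then prod * PySem.List.pyGetD L i 0 else prod
    if i = r then prod' else fooAltAux fuel L r (i + 1) prod'

def foo_alt (L : List Int) (p : Int) (r : Int) : Int :=
  fooAltAux ((r - p).toNat + 1) L r p 1

-- ===== PRECONDITION & SPEC =====
-- Pre_ = exactly where Python A returns: p ≤ r (otherwise the recursion never reaches a
-- base case: RecursionError) and every index of [p, r] valid, negative wraparound included
-- (otherwise IndexError).
def Pre_foo (L : List Int) (p : Int) (r : Int) : Prop :=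
  p ≤ r ∧ -(L.length : Int) ≤ p ∧ r < (L.length : Int)
instance (L : List Int) (p : Int) (r : Int) : Decidable (Pre_foo L p r) := by
  unfold Pre_foo; infer_instance

def pvWitness_foo : List Int × Int × Int := ([7, 3, 14], 0, 2)

def Spec_foo (L : List Int) (p : Int) (r : Int) (out : Int) : Prop := out = foo_alt L p r
instance (L : List Int) (p : Int) (r : Int) (out : Int) : Decidable (Spec_foo L p r out) := by
  unfold Spec_foo; infer_instance

-- ===== CLAIM (what is proved, stated in full; the proofs are below) =====
def Claim_equal_foo : Prop := ∀ (L : List Int) (p : Int) (r : Int),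
  Dom_foo L p r → Pre_foo L p r → Spec_foo L p r (foo L p r)

-- ===== LEMMAS AND PROOFS =====

-- the factor contributed by index i
def pvFactor (L : List Int) (i : Int) : Int :=
  let v := PySem.List.pyGetD L i 0
  if PySem.Int.mod v 7 = 0 then v else 1

-- canonical form: product of the factors over [p, r]
def pvProd (L : List Int) (p r : Int) : Int :=
  ((PySem.List.pyRange p (r + 1) 1).map (pvFactor L)).prod

lemma fooAltAux_eq_pvProd (fuel : Nat) :
    ∀ (L : List Int) (r i prod : Int), i ≤ r → (r - i).toNat < fuel →
      fooAltAux fuel L r i prod = prod * pvProd L i r := by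
  induction fuel with
  | zero => intro L r i prod _ h; omega
  | succ fuel ih =>
    intro L r i prod hir hfuel
    have hcons : PySem.List.pyRange i (r + 1) 1
        = i :: PySem.List.pyRange (i + 1) (r + 1) 1 :=
      PySem.List.pyRange_one_cons (by omega)
    by_cases hie : i = r
    · subst hie
      simp only [fooAltAux, if_pos rfl, pvProd, PySem.List.pyRange_one_singleton,
        List.map_cons, List.map_nil, List.prod_cons, List.prod_nil, pvFactor]
      split_ifs <;> ring
    · have h1 : fooAltAux fuel L r (i + 1)
          (if PySem.Int.mod (PySem.List.pyGetD L i 0) 7 = 0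
           then prod * PySem.List.pyGetD L i 0 else prod)
          = (if PySem.Int.mod (PySem.List.pyGetD L i 0) 7 = 0
             then prod * PySem.List.pyGetD L i 0 else prod) * pvProd L (i + 1) r :=
        ih L r (i + 1) _ (by omega) (by omega)
    
      simp only [fooAltAux, if_neg hie, h1, pvProd, hcons, List.map_cons,
        List.prod_cons, pvFactor]
      split_ifs <;> ring

lemma foo_alt_eq_pvProd (L : List Int) (p r : Int) (h : p ≤ r) :
    foo_alt L p r = pvProd L p r := by
  unfold foo_alt
  rw [fooAltAux_eq_pvProd _ L r p 1 h (by omega)]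
  ring

lemma fooAux_eq_pvProd (fuel : Nat) :
    ∀ (L : List Int) (p r : Int), p ≤ r → (r - p).toNat < fuel →
      fooAux fuel L p r = pvProd L p r := by
  induction fuel with
  | zero => intro L p r _ h; omega
  | succ fuel ih =>
    intro L p r hpr hfuel
    by_cases hpe : p = r
    · subst hpe
      simp [fooAux, pvProd, PySem.List.pyRange_one_singleton, pvFactor]
    · have hlt : p < r := lt_of_le_of_ne hpr hpe
      have hmid1 : p ≤ PySem.Int.floordiv (p + r) 2 := by
        rw [PySem.Int.le_floordiv_iff_mul_le (by omega)]; omega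
      have hmid2 : PySem.Int.floordiv (p + r) 2 < r := by
        rw [PySem.Int.floordiv_lt_iff_lt_mul (by omega)]; omega
      set mid := PySem.Int.floordiv (p + r) 2 with hm
      have h1 : fooAux fuel L p mid = pvProd L p mid := ih L p mid hmid1 (by omega)
      have h2 : fooAux fuel L (mid + 1) r = pvProd L (mid + 1) r := ih L (mid + 1) r (by omega) (by omega)
      have hsplit : PySem.List.pyRange p (r + 1) 1
          = PySem.List.pyRange p (mid + 1) 1 ++ PySem.List.pyRange (mid + 1) (r + 1) 1 :=
        PySem.List.pyRange_one_append p (mid + 1) (r + 1) (by omega) (by omega)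
      simp only [fooAux, if_neg hpe, ← hm, h1, h2]
      simp [pvProd, hsplit]

-- ===== VERDICT (by name: the statement is the Claim_ definition above) =====
theorem foo_spec : Claim_equal_foo := by
  intro L p r _hdom hpre
  unfold Spec_foo foo
  rw [foo_alt_eq_pvProd L p r hpre.1]
  exact fooAux_eq_pvProd _ L p r hpre.1 (Nat.lt_succ_self _)
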